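-- pv_equiv track=rewrite | github.com/zitkat/ukoly_py_zs2018 | 07_seznamy/fun_zvirena.py | vytvor_listy
-- ===== SOURCE A (Python) =====
-- def vytvor_listy(seznam1, seznam2):
--
--     s1ms2 = []
--     s2ms1 = []
--     s1Us2 = []
--
--     for polozka in seznam1 + seznam2:
--         if polozka not in seznam2:
--             s1ms2.append(polozka)
--         if polozka not in seznam1:
--             s2ms1.append(polozka)
--         if polozka not in s1Us2:
--             s1Us2.append(polozka)
--     return s1Us2, s1ms2, s2ms1
-- ===== SOURCE B (Python) =====
-- def vytvor_listy(seznam1, seznam2):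
--     s1ms2 = [x for x in seznam1 if x not in seznam2]
--     s2ms1 = [x for x in seznam2 if x not in seznam1]
--     s1Us2 = []
--     for x in seznam1 + seznam2:
--         if x not in s1Us2:
--             s1Us2.append(x)
--     return s1Us2, s1ms2, s2ms1
-- ===== Notes on version B (the rewrite author's own statement) =====
-- stated objective: simpler
-- what changed: Replaced the single fused three-branch loop over the concatenation with three independent passes: two list-comprehension filters (each over only its own list) for the differences, and a separate order-preserving dedup loop for the union.
import Mathlib
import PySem

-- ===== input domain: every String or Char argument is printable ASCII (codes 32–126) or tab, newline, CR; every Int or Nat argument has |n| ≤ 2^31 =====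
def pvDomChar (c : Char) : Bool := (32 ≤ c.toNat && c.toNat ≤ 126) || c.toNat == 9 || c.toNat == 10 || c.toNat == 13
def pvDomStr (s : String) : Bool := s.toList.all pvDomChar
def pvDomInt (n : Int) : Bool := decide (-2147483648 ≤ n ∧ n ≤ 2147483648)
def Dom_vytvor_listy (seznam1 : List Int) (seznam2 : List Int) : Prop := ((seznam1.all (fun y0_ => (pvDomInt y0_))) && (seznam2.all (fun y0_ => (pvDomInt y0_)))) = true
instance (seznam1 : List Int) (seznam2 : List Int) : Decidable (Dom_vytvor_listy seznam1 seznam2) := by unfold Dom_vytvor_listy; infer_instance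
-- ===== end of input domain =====

-- ===== PORT A =====
-- B splits A's fused three-branch loop into two filters plus a separate dedup loop (simpler decomposition, same values).
def vytvor_listy (seznam1 : List Int) (seznam2 : List Int) : List Int × List Int × List Int :=
  let st := (seznam1 ++ seznam2).foldl
    (fun (acc : List Int × List Int × List Int) polozka =>
      let s1ms2 := if seznam2.contains polozka then acc.1 else acc.1 ++ [polozka]
      let s2ms1 := if seznam1.contains polozka then acc.2.1 else acc.2.1 ++ [polozka]
      let s1Us2 := if acc.2.2.contains polozka then acc.2.2 else acc.2.2 ++ [polozka]
      (s1ms2, s2ms1, s1Us2))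
    ([], [], [])
  (st.2.2, st.1, st.2.1)

-- ===== PORT B =====
def vytvor_listy_alt (seznam1 : List Int) (seznam2 : List Int) : List Int × List Int × List Int :=
  let s1ms2 := seznam1.filter (fun x => !(seznam2.contains x))
  let s2ms1 := seznam2.filter (fun x => !(seznam1.contains x))
  let s1Us2 := (seznam1 ++ seznam2).foldl
    (fun u x => if u.contains x then u else u ++ [x]) []
  (s1Us2, s1ms2, s2ms1)

-- ===== PRECONDITION & SPEC =====
def Spec_vytvor_listy (seznam1 : List Int) (seznam2 : List Int) (out : List Int × List Int × List Int) : Prop := out = vytvor_listy_alt seznam1 seznam2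
instance (seznam1 : List Int) (seznam2 : List Int) (out : List Int × List Int × List Int) : Decidable (Spec_vytvor_listy seznam1 seznam2 out) := by unfold Spec_vytvor_listy; infer_instance

-- ===== CLAIM (what is proved, stated in full; the proofs are below) =====
def Claim_equal_vytvor_listy : Prop := ∀ (seznam1 : List Int) (seznam2 : List Int), Dom_vytvor_listy seznam1 seznam2 → Spec_vytvor_listy seznam1 seznam2 (vytvor_listy seznam1 seznam2)

-- ===== LEMMAS AND PROOFS =====

-- A's fold updates its three components independently; split it into three folds.
theorem foldl_triple_split (l : List Int) (g1 g2 g3 : List Int → Int → List Int)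
    (a b c : List Int) :
    l.foldl (fun (acc : List Int × List Int × List Int) p =>
        (g1 acc.1 p, g2 acc.2.1 p, g3 acc.2.2 p)) (a, b, c)
      = (l.foldl g1 a, l.foldl g2 b, l.foldl g3 c) := by
  induction l generalizing a b c with
  | nil => rfl
  | cons x xs ih => simpa using ih (g1 a x) (g2 b x) (g3 c x)

-- A conditional-append fold is an accumulator plus a filter.
theorem foldl_condAppend_eq_filter (ref : List Int) (l a : List Int) :
    l.foldl (fun acc p => if ref.contains p then acc else acc ++ [p]) a
      = a ++ l.filter (fun p => !(ref.contains p)) := by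
  induction l generalizing a with
  | nil => simp
  | cons x xs ih =>
    rw [List.foldl_cons, ih]
    by_cases h : ref.contains x
    · simp [List.filter_cons, List.contains_eq_mem] at *
      simp [h]
    · simp [List.filter_cons, List.contains_eq_mem] at h ⊢
      simp [h]

theorem filter_self_contains_nil (l : List Int) :
    l.filter (fun p => !(l.contains p)) = [] := by
  rw [List.filter_eq_nil_iff]
  intro a ha
  simp [ha]

-- ===== VERDICT (by name: the statement is the Claim_ definition above) =====
theorem vytvor_listy_spec : Claim_equal_vytvor_listy := by
  intro s1 s2 _
  show vytvor_listy s1 s2 = vytvor_listy_alt s1 s2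
  unfold vytvor_listy vytvor_listy_alt
  dsimp only
  rw [foldl_triple_split (s1 ++ s2)
    (fun a p => if s2.contains p then a else a ++ [p])
    (fun a p => if s1.contains p then a else a ++ [p])
    (fun u p => if u.contains p then u else u ++ [p]) [] [] []]
  simp only [List.foldl_append, foldl_condAppend_eq_filter, filter_self_contains_nil]
  simp
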